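-- pv_equiv track=rewrite | github.com/biasmv/tap | table/typeutil.py | guess_col_type
-- ===== SOURCE A (Python) =====
-- def is_null_string(value):
--   '''
--   Returns true when the string is either empty, 'NULL', 'NONE' or 'NA'
--   '''
--   value=value.strip().upper()
--   return value in ('', 'NULL', 'NONE', 'NA')
--
-- def guess_col_type(iterable):
--   '''
--   guess column type for iterable
--   '''
--   empty=True
--   possibilities=set(['bool', 'int', 'float'])
--   for ele in iterable:
--     str_ele=str(ele).upper()
--     if is_null_string(str_ele):
--       continue
--     empty=False
--     if 'int' in possibilities:
--       try:
--         int(str_ele)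
--       except ValueError:
--         possibilities.remove('int')
--
--     if 'float' in possibilities:
--       try:
--         float(str_ele)
--       except ValueError:
--         possibilities.remove('float')
--     if 'bool' in possibilities:
--       if str_ele not in set(['YES', 'NO', 'TRUE', 'FALSE']):
--         possibilities.remove('bool')
--
--     if len(possibilities)==0:
--       return 'string'
--   if len(possibilities)==2:
--     return 'int'
--   if empty:
--     return 'string'
--   # return the last element available
--   return possibilities.pop()
-- ===== SOURCE B (Python) =====
-- _NULLS = ('', 'NULL', 'NONE', 'NA')
-- _BOOLS = ('YES', 'NO', 'TRUE', 'FALSE')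
--
-- def _is_int(v):
--   try:
--     int(v)
--     return True
--   except ValueError:
--     return False
--
-- def _is_float(v):
--   try:
--     float(v)
--     return True
--   except ValueError:
--     return False
--
-- def guess_col_type(iterable):
--   '''
--   guess column type for iterable
--   '''
--   vals = [v for v in (str(ele).upper() for ele in iterable)
--           if v.strip().upper() not in _NULLS]
--   if not vals:
--     return 'string'
--   if all(_is_int(v) for v in vals):
--     return 'int'
--   if all(_is_float(v) for v in vals):
--     return 'float'
--   if all(v in _BOOLS for v in vals):
--     return 'bool'
--   return 'string'
-- ===== Notes on version B (the rewrite author's own statement) =====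
-- stated objective: simpler
-- what changed: A's single narrowing pass that mutates a possibility set with guarded removals, an early exit and a final size-based decode is replaced by a null-filter comprehension followed by three independent all() scans (int/float/bool) and a direct if-chain decode.
import Mathlib
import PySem

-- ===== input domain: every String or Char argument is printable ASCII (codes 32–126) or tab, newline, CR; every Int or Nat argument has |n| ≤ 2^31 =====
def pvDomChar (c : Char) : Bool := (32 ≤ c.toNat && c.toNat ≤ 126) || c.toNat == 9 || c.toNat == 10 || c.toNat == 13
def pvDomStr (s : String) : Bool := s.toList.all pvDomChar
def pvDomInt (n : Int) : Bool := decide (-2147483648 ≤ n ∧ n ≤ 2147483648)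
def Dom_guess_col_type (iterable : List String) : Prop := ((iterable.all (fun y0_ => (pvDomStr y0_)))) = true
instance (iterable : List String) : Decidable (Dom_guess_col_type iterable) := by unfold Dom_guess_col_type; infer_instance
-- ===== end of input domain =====

-- B replaces A's single narrowing pass (mutated possibility set + early exit) by a null-filter
-- followed by three independent all() scans and a direct decode; objective: simpler.

-- ===== PORT A =====
-- A-side models of the Python builtins A calls (int(), float(), the null test).
-- pvDigitsRest/pvDigits?: Python's digit-run grammar 'digit ((_ digit) | digit)*' (single '_' between digits).
def pvDigitsRest : List Char → List Char
  | '_' :: c :: r => if c.isDigit then pvDigitsRest r else '_' :: c :: r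
  | c :: r => if c.isDigit then pvDigitsRest r else c :: r
  | [] => []

def pvDigits? : List Char → Option (List Char)
  | c :: r => if c.isDigit then some (pvDigitsRest r) else none
  | [] => none

def pvDropSign : List Char → List Char
  | '+' :: r => r
  | '-' :: r => r
  | cs => cs

def pvExpDigits (cs : List Char) : Bool :=
  pvDigits? (pvDropSign cs) == some []

def pvExpEnd : List Char → Bool
  | [] => true
  | 'E' :: r => pvExpDigits r
  | 'e' :: r => pvExpDigits r
  | _ => false

def pvNumber (cs : List Char) : Bool :=
  match pvDigits? cs with
  | some ('.' :: r2) =>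
      pvExpEnd (match pvDigits? r2 with | some r3 => r3 | none => r2)
  | some rest => pvExpEnd rest
  | none =>
      match cs with
      | '.' :: r2 => (match pvDigits? r2 with | some r3 => pvExpEnd r3 | none => false)
      | _ => false

-- model of 'float(s) raises no ValueError' (hand-written: PySem has no float parser).
-- Exact on the strings this file feeds it: uppercased ASCII (so 'INF'/'INFINITY'/'NAN' need only their uppercase forms).
def pvIsFloat (s : String) : Bool :=
  let cs := pvDropSign (PySem.Str.strip s).toList
  cs == "INF".toList || cs == "INFINITY".toList || cs == "NAN".toList || pvNumber cs

-- model of 'int(s) raises no ValueError'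
def pvIsInt (s : String) : Bool := (PySem.Int.ofStr? s).isSome

-- is_null_string from the module
def pvIsNull (s : String) : Bool :=
  let v := PySem.Str.upper (PySem.Str.strip s)
  v == "" || v == "NULL" || v == "NONE" || v == "NA"

def pvBoolWords : List String := ["YES", "NO", "TRUE", "FALSE"]

-- A's loop body: the three guarded membership-test-and-remove steps on the possibility set
def stepChain (tI tF tB : Bool) (poss : PySem.Set String) : PySem.Set String :=
  let p1 := if PySem.Set.contains poss "int" && !tI then PySem.Set.discard poss "int" else poss
  let p2 := if PySem.Set.contains p1 "float" && !tF then PySem.Set.discard p1 "float" else p1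
  if PySem.Set.contains p2 "bool" && !tB then PySem.Set.discard p2 "bool" else p2

-- A's for-loop (the nil case is A's post-loop code; possibilities.pop() is ported as headD,
-- exact because that line is only reached with a singleton set — hash order never matters)
def guessLoop : List String → Bool → PySem.Set String → String
  | [], empty, poss =>
      if poss.length = 2 then "int"
      else if empty then "string"
      else poss.headD "string"
  | ele :: rest, empty, poss =>
      let str_ele := PySem.Str.upper ele
      if pvIsNull str_ele then guessLoop rest empty poss
      else
        let p3 := stepChain (pvIsInt str_ele) (pvIsFloat str_ele) (pvBoolWords.contains str_ele) poss
        if p3.length = 0 then "string" else guessLoop rest false p3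

def guess_col_type (iterable : List String) : String :=
  guessLoop iterable true (PySem.Set.ofList ["bool", "int", "float"])

-- ===== PORT B =====
-- B-side helpers. B classifies values at the character-list level; its model of
-- 'float(v) raises no ValueError' is a state-machine recognizer (bExpRun…bFloatStart),
-- structurally unlike A's recursive-descent digit-run grammar; exact on the uppercased
-- ASCII strings B feeds it. B's model of int() is PySem's builtin parser over chars.
def bExpRun : List Char → Bool
  | [] => true
  | '_' :: c :: r => c.isDigit && bExpRun r
  | c :: r => c.isDigit && bExpRun r

def bExpDigits : List Char → Bool
  | c :: r => c.isDigit && bExpRun r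
  | [] => false

def bExpSign : List Char → Bool
  | '+' :: r => bExpDigits r
  | '-' :: r => bExpDigits r
  | cs => bExpDigits cs

def bFrac : List Char → Bool
  | [] => true
  | '_' :: c :: r => c.isDigit && bFrac r
  | 'E' :: r => bExpSign r
  | 'e' :: r => bExpSign r
  | c :: r => c.isDigit && bFrac r

def bAfterDot : List Char → Bool
  | [] => true
  | 'E' :: r => bExpSign r
  | 'e' :: r => bExpSign r
  | c :: r => c.isDigit && bFrac r

def bIntPart : List Char → Bool
  | [] => true
  | '_' :: c :: r => c.isDigit && bIntPart r
  | '.' :: r => bAfterDot r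
  | 'E' :: r => bExpSign r
  | 'e' :: r => bExpSign r
  | c :: r => c.isDigit && bIntPart r

def bFloatStart : List Char → Bool
  | [] => false
  | c :: r =>
      if c = '.' then
        match r with
        | c2 :: r2 => c2.isDigit && bFrac r2
        | [] => false
      else c.isDigit && bIntPart r

def bSign : List Char → List Char
  | '+' :: r => r
  | '-' :: r => r
  | cs => cs

def bIsFloat (cs : List Char) : Bool :=
  let t := bSign (PySem.Chars.strip cs)
  t == ['I','N','F'] || t == ['I','N','F','I','N','I','T','Y'] || t == ['N','A','N'] || bFloatStart t

def bIsInt (cs : List Char) : Bool := (PySem.Int.ofChars? cs).isSome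

def bNullForms : List (List Char) := [[], ['N','U','L','L'], ['N','O','N','E'], ['N','A']]

def bIsNull (cs : List Char) : Bool :=
  bNullForms.contains (PySem.Chars.upper (PySem.Chars.strip cs))

def bIsBool (cs : List Char) : Bool :=
  cs == ['Y','E','S'] || cs == ['N','O'] || cs == ['T','R','U','E'] || cs == ['F','A','L','S','E']

def guess_col_type_alt (iterable : List String) : String :=
  let vals := (iterable.map (fun ele => PySem.Chars.upper ele.toList)).filter (fun v => !bIsNull v)
  if vals.isEmpty then "string"
  else if vals.all bIsInt then "int"
  else if vals.all bIsFloat then "float"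
  else if vals.all bIsBool then "bool"
  else "string"

-- ===== PRECONDITION & SPEC =====
def Spec_guess_col_type (iterable : List String) (out : String) : Prop := out = guess_col_type_alt iterable
instance (iterable : List String) (out : String) : Decidable (Spec_guess_col_type iterable out) := by unfold Spec_guess_col_type; infer_instance

-- ===== CLAIM (what is proved, stated in full; the proofs are below) =====
def Claim_equal_guess_col_type : Prop := ∀ (iterable : List String), Dom_guess_col_type iterable → Spec_guess_col_type iterable (guess_col_type iterable)

-- ===== LEMMAS AND PROOFS =====

-- ---- B's float state machine recognizes exactly A's recursive-descent grammar ----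
lemma bExpRun_eq : ∀ r, bExpRun r = (pvDigitsRest r == []) := by
  intro r
  induction r using bExpRun.induct with
  | case1 => decide
  | case2 c r ih => by_cases h : c.isDigit <;> simp [bExpRun, pvDigitsRest, h, ih]
  | case3 c r h2 ih => by_cases h : c.isDigit <;> simp [bExpRun, pvDigitsRest, h, ih]

lemma bExpDigits_eq : ∀ cs, bExpDigits cs = (pvDigits? cs == some []) := by
  intro cs
  match cs with
  | [] => decide
  | c :: r => by_cases h : c.isDigit <;> simp [bExpDigits, pvDigits?, h, bExpRun_eq]

lemma bExpSign_eq : ∀ cs, bExpSign cs = pvExpDigits cs := by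
  intro cs
  match cs with
  | [] => decide
  | c :: r =>
    by_cases h1 : c = '+'
    · simp [bExpSign, pvExpDigits, pvDropSign, h1, bExpDigits_eq]
    · by_cases h2 : c = '-'
      · simp [bExpSign, pvExpDigits, pvDropSign, h2, bExpDigits_eq]
      · simp [bExpSign, pvExpDigits, pvDropSign, h1, h2, bExpDigits_eq]

lemma bFrac_eq : ∀ r, bFrac r = pvExpEnd (pvDigitsRest r) := by
  intro r
  induction r using bFrac.induct with
  | case1 => decide
  | case2 c r ih => by_cases h : c.isDigit <;> simp [bFrac, pvDigitsRest, pvExpEnd, h, ih]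
  | case3 r => simp [bFrac, pvDigitsRest, pvExpEnd, bExpSign_eq]
  | case4 r => simp [bFrac, pvDigitsRest, pvExpEnd, bExpSign_eq]
  | case5 c r h1 h2 h3 ih =>
      by_cases h : c.isDigit <;>
        simp_all [bFrac, pvDigitsRest, pvExpEnd]

lemma bAfterDot_eq : ∀ r2, bAfterDot r2 =
    pvExpEnd (match pvDigits? r2 with | some r3 => r3 | none => r2) := by
  intro r2
  match r2 with
  | [] => decide
  | 'E' :: r => simp [bAfterDot, pvDigits?, pvExpEnd, bExpSign_eq]
  | 'e' :: r => simp [bAfterDot, pvDigits?, pvExpEnd, bExpSign_eq]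
  | c :: r =>
      by_cases h : c.isDigit
      · have h1 : c ≠ 'E' := by rintro rfl; simp at h
        have h2 : c ≠ 'e' := by rintro rfl; simp at h
        simp [bAfterDot, pvDigits?, h, bFrac_eq]
      · by_cases h1 : c = 'E' <;> by_cases h2 : c = 'e' <;>
          simp_all [bAfterDot, pvDigits?, pvExpEnd, bExpSign_eq]

lemma bIntPart_eq : ∀ r, bIntPart r =
    (match pvDigitsRest r with
     | '.' :: r2 => pvExpEnd (match pvDigits? r2 with | some r3 => r3 | none => r2)
     | rest => pvExpEnd rest) := by
  intro r
  induction r using bIntPart.induct with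
  | case1 => decide
  | case2 c r ih => by_cases h : c.isDigit <;> simp [bIntPart, pvDigitsRest, pvExpEnd, h, ih]
  | case3 r => simp [bIntPart, pvDigitsRest, bAfterDot_eq]
  | case4 r => simp [bIntPart, pvDigitsRest, pvExpEnd, bExpSign_eq]
  | case5 r => simp [bIntPart, pvDigitsRest, pvExpEnd, bExpSign_eq]
  | case6 c r h1 h2 h3 h4 ih =>
      by_cases h : c.isDigit <;> simp_all [bIntPart, pvDigitsRest, pvExpEnd]

lemma bFloatStart_eq : ∀ cs, bFloatStart cs = pvNumber cs := by
  intro cs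
  rcases cs with _ | ⟨c, r⟩
  · decide
  · by_cases hdot : c = '.'
    · subst hdot
      rcases r with _ | ⟨c2, r2⟩
      · decide
      · by_cases h : c2.isDigit <;>
          simp [bFloatStart, pvNumber, pvDigits?, h, bFrac_eq]
    · by_cases h : c.isDigit
      · have hb : bFloatStart (c :: r) = bIntPart r := by simp [bFloatStart, hdot, h]
        rw [hb, bIntPart_eq]
        simp only [pvNumber, pvDigits?, h, if_true]
        rcases hrest : pvDigitsRest r with _ | ⟨c2, r2⟩
        · simp
        · by_cases h2 : c2 = '.' <;> simp_all
      · have hb : bFloatStart (c :: r) = false := by simp [bFloatStart, hdot, h]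
        have hpd : pvDigits? (c :: r) = none := by simp [pvDigits?, h]
        rw [hb]
        simp only [pvNumber, hpd]
        split
        · simp_all
        · rfl

-- ---- bridges: B's char-level predicates agree with A's string-level ones ----
lemma strBeqToList (u w : String) : (u == w) = (u.toList == w.toList) := by
  by_cases h : u = w
  · simp [h]
  · have h2 : u.toList ≠ w.toList := fun hh => h (String.ext_iff.mpr hh)
    simp [h, h2]

lemma bIsNull_eq (s : String) : bIsNull s.toList = pvIsNull s := by
  have h : (PySem.Str.upper (PySem.Str.strip s)).toList
      = PySem.Chars.upper (PySem.Chars.strip s.toList) := by simp [pysem]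
  simp only [bIsNull, bNullForms, pvIsNull, ← h, strBeqToList, List.contains_cons,
    List.contains_nil, Bool.or_false]
  have e1 : ("" : String).toList = [] := rfl
  have e2 : ("NULL" : String).toList = ['N','U','L','L'] := rfl
  have e3 : ("NONE" : String).toList = ['N','O','N','E'] := rfl
  have e4 : ("NA" : String).toList = ['N','A'] := rfl
  rw [e1, e2, e3, e4]
  cases hq : ((PySem.Str.upper (PySem.Str.strip s)).toList == []) <;>
    simp [BEq.comm, Bool.or_comm, Bool.or_left_comm]

lemma bIsInt_eq (s : String) : bIsInt s.toList = pvIsInt s := rfl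

lemma bIsFloat_eq (s : String) : bIsFloat s.toList = pvIsFloat s := by
  have h : (PySem.Str.strip s).toList = PySem.Chars.strip s.toList := by simp [pysem]
  have hsign : ∀ cs, bSign cs = pvDropSign cs := fun cs => rfl
  simp only [bIsFloat, pvIsFloat, ← h, hsign, bFloatStart_eq]
  rfl

lemma bIsBool_eq (s : String) : bIsBool s.toList = pvBoolWords.contains s := by
  simp only [pvBoolWords, List.contains_cons, List.contains_nil, Bool.or_false,
    strBeqToList, bIsBool]
  have e1 : ("YES" : String).toList = ['Y','E','S'] := rfl
  have e2 : ("NO" : String).toList = ['N','O'] := rfl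
  have e3 : ("TRUE" : String).toList = ['T','R','U','E'] := rfl
  have e4 : ("FALSE" : String).toList = ['F','A','L','S','E'] := rfl
  rw [e1, e2, e3, e4]
  simp [BEq.comm, Bool.or_assoc]

-- B's result, re-expressed over the string-level predicates A's loop analysis uses
lemma alt_eq (l : List String) : guess_col_type_alt l =
    (let vs := (l.map PySem.Str.upper).filter (fun v => !pvIsNull v)
     if vs.isEmpty then "string"
     else if vs.all pvIsInt then "int"
     else if vs.all pvIsFloat then "float"
     else if vs.all (fun v => pvBoolWords.contains v) then "bool"
     else "string") := by
  unfold guess_col_type_alt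
  have hm : (l.map (fun ele => PySem.Chars.upper ele.toList))
      = (l.map PySem.Str.upper).map String.toList := by
    rw [List.map_map]
    refine List.map_congr_left (fun e _ => ?_)
    simp [pysem]
  rw [hm, List.filter_map]
  simp only [Function.comp_def, bIsNull_eq, List.isEmpty_map, List.all_map,
    bIsInt_eq, bIsFloat_eq, bIsBool_eq]

-- the reachable possibility sets: ordered sublists of the initial insertion order, keyed by three flags
def reprSet (b i f : Bool) : List String :=
  (if b then ["bool"] else []) ++ (if i then ["int"] else []) ++ (if f then ["float"] else [])

lemma stepChain_reprSet : ∀ (tI tF tB b i f : Bool),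
    stepChain tI tF tB (reprSet b i f) = reprSet (b && tB) (i && tI) (f && tF) := by decide

lemma reprSet_len_ne_zero : ∀ (b i f : Bool), (b || i || f) = true → (reprSet b i f).length ≠ 0 := by decide

lemma bool_not_int : ∀ v : String, v ∈ pvBoolWords → pvIsInt v = false := by
  intro v h
  simp [pvBoolWords] at h
  rcases h with h | h | h | h <;> subst h <;> decide

lemma bool_not_float : ∀ v : String, v ∈ pvBoolWords → pvIsFloat v = false := by
  intro v h
  simp [pvBoolWords] at h
  rcases h with h | h | h | h <;> subst h <;> decide

-- the loop invariant: a run of A's loop from any reachable state computes the decode of the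
-- three 'all survivors' flags over the remaining non-null values
lemma loopSpec : ∀ (l : List String) (b i f empty : Bool),
    (b || i || f) = true → (empty = true → (b && i && f) = true) →
    guessLoop l empty (reprSet b i f) =
      (let vs := (l.map PySem.Str.upper).filter (fun v => !pvIsNull v)
       let b' := b && vs.all (fun v => pvBoolWords.contains v)
       let i' := i && vs.all pvIsInt
       let f' := f && vs.all pvIsFloat
       if (b' || i' || f') = false then "string"
       else if ((if b' then 1 else 0) + (if i' then 1 else 0) + (if f' then 1 else 0) : Nat) = 2 then "int"
       else if empty && vs.isEmpty then "string"
       else if b' then "bool" else if i' then "int" else "float") := by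
  intro l
  induction l with
  | nil =>
      intro b i f empty h1 h2
      cases b <;> cases i <;> cases f <;> cases empty <;> simp_all <;> decide
  | cons ele rest ih =>
      intro b i f empty h1 h2
      by_cases hN : pvIsNull (PySem.Str.upper ele) = true
      · have : guessLoop (ele :: rest) empty (reprSet b i f)
            = guessLoop rest empty (reprSet b i f) := by
          simp [guessLoop, hN]
        rw [this, ih b i f empty h1 h2]
        simp [hN]
      · rw [Bool.not_eq_true] at hN
        have hstep : guessLoop (ele :: rest) empty (reprSet b i f)
            = (let p3 := reprSet (b && pvBoolWords.contains (PySem.Str.upper ele))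
                                 (i && pvIsInt (PySem.Str.upper ele))
                                 (f && pvIsFloat (PySem.Str.upper ele))
               if p3.length = 0 then "string" else guessLoop rest false p3) := by
          simp [guessLoop, hN, stepChain_reprSet]
        set u := PySem.Str.upper ele with hu
        set b2 := b && pvBoolWords.contains u with hb2
        set i2 := i && pvIsInt u with hi2
        set f2 := f && pvIsFloat u with hf2
        by_cases h0 : (b2 || i2 || f2) = true
        · have hlen := reprSet_len_ne_zero b2 i2 f2 h0
          rw [hstep]
          simp only [hlen]
          rw [ih b2 i2 f2 false h0 (by simp)]
          simp only [hb2, hi2, hf2, List.map_cons, List.filter_cons, ← hu, hN, Bool.not_false,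
            if_true, List.all_cons, List.isEmpty_cons, Bool.and_false, Bool.false_and,
            Bool.and_assoc]
          simp
        · -- all three survivors are gone after this element: both sides say "string"
          have hb : b2 = false := by revert h0; cases b2 <;> cases i2 <;> cases f2 <;> simp
          have hi : i2 = false := by revert h0; cases b2 <;> cases i2 <;> cases f2 <;> simp
          have hf : f2 = false := by revert h0; cases b2 <;> cases i2 <;> cases f2 <;> simp
          rw [hstep]
          simp only [hb, hi, hf]
          have hrepr : (reprSet false false false).length = 0 := by decide
          simp only [hrepr, if_true]
          simp only [List.map_cons, List.filter_cons, ← hu, hN]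
          simp only [Bool.not_false, if_true, List.all_cons]
          have hb' : (b && (pvBoolWords.contains u && List.all ((rest.map PySem.Str.upper).filter (fun v => !pvIsNull v)) (fun v => pvBoolWords.contains v))) = false := by
            rw [← Bool.and_assoc, ← hb2, hb]; simp
          have hi' : (i && (pvIsInt u && List.all ((rest.map PySem.Str.upper).filter (fun v => !pvIsNull v)) pvIsInt)) = false := by
            rw [← Bool.and_assoc, ← hi2, hi]; simp
          have hf' : (f && (pvIsFloat u && List.all ((rest.map PySem.Str.upper).filter (fun v => !pvIsNull v)) pvIsFloat)) = false := by
            rw [← Bool.and_assoc, ← hf2, hf]; simp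
          rw [hb', hi', hf']
          rfl

-- ===== VERDICT (by name: the statement is the Claim_ definition above) =====
theorem guess_col_type_spec : Claim_equal_guess_col_type := by
  intro l _
  unfold Spec_guess_col_type
  rw [alt_eq]
  have hinit : PySem.Set.ofList ["bool", "int", "float"] = reprSet true true true := by decide
  unfold guess_col_type
  rw [hinit, loopSpec l true true true true rfl (fun _ => rfl)]
  simp only [Bool.true_and]
  set vs := (l.map PySem.Str.upper).filter (fun v => !pvIsNull v) with hvs
  rcases hE : vs with _ | ⟨v, t⟩
  · simp
  · have hv : v ∈ vs := by rw [hE]; exact List.mem_cons_self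
    by_cases hAI : vs.all pvIsInt = true
    · have hvi : pvIsInt v = true := by
        have := List.all_eq_true.mp hAI; exact this v hv
      have hAB : vs.all (fun v => pvBoolWords.contains v) = false := by
        rcases hB : vs.all (fun v => pvBoolWords.contains v) with _ | _
        · rfl
        · have := (List.all_eq_true.mp hB) v hv
          rw [bool_not_int v (by simpa using this)] at hvi; exact absurd hvi (by simp)
      rw [hE] at hAB hAI
      rcases hAF : List.all (v :: t) pvIsFloat with _ | _
      · simp [hAI]
      · simp [hAI]
        intro h1 _ _
        exact absurd hvi (by simp [bool_not_int v h1])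
    · rw [Bool.not_eq_true] at hAI
      by_cases hAF : vs.all pvIsFloat = true
      · have hvf : pvIsFloat v = true := (List.all_eq_true.mp hAF) v hv
        have hAB : vs.all (fun v => pvBoolWords.contains v) = false := by
          rcases hB : vs.all (fun v => pvBoolWords.contains v) with _ | _
          · rfl
          · have := (List.all_eq_true.mp hB) v hv
            rw [bool_not_float v (by simpa using this)] at hvf; exact absurd hvf (by simp)
        rw [hE] at hAB hAI hAF
        simp [hAI, hAF]
        have hnb : ¬(v ∈ pvBoolWords ∧ ∀ x ∈ t, x ∈ pvBoolWords) := by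
          rintro ⟨h1, -⟩
          exact absurd hvf (by simp [bool_not_float v h1])
        simp [hnb]
      · rw [Bool.not_eq_true] at hAF
        rw [hE] at hAI hAF
        rcases hAB : List.all (v :: t) (fun v => pvBoolWords.contains v) with _ | _
        · simp [hAI, hAF]
        · simp [hAI, hAF]
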